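-- pv_equiv track=rewrite | github.com/theabhishekmandal/Code | PythonImplementation/techgigvcl.py | possibleways
-- ===== SOURCE A (Python) =====
-- def possibleways(input1):
-- 	a=[0]*len(input1)
-- 	a[0]=input1[0]
-- 	for i in range (1,len(input1)):
-- 		a[i]=input1[i]+a[i-1]
-- 	answer=0
-- 	longvalue=1000000007
-- 	for i in range (1,len(a)+1):
-- 		for j in range (0,len(a)+1-i):
-- 			save=0
-- 			if(j==0):
-- 				save+=a[i+j-1]
-- 			else:
-- 				save+=a[i+j-1]-a[j-1]
-- 			answer+=((save%longvalue)*(input1[i+j-1]%longvalue))%longvalue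
-- 	return answer%longvalue;
-- ===== SOURCE B (Python) =====
-- def possibleways(input1):
--     M = 1000000007
--     total = 0
--     t = 0  # sum of the sums of all subarrays ending at the current index
--     for i, x in enumerate(input1):
--         t += (i + 1) * x
--         total += t * x
--     return total % M
-- ===== Notes on version B (the rewrite author's own statement) =====
-- stated objective: faster
-- what changed: Replaced the O(n^2) double loop over all (length, start) pairs by a single pass that maintains the running sum t of all subarray sums ending at the current index (t += (i+1)*x) and accumulates t*x, taking one final mod; correctness rests on sum-of-mods == mod-of-sum modulo 1000000007.
import Mathlib
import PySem

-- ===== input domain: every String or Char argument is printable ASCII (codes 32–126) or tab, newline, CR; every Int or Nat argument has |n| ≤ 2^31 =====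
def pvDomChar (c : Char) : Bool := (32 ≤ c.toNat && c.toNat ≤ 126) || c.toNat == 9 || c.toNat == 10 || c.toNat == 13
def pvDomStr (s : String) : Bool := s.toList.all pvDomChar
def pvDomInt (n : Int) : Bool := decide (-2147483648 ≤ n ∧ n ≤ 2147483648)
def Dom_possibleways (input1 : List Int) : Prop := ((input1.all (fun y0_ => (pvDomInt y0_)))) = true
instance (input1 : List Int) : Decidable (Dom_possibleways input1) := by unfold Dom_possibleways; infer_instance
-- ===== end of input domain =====

-- B replaces A's O(n^2) double loop by one pass that keeps the running sum of the sums of all subarrays ending at the current index (measurably faster).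

-- ===== PORT A =====
def possibleways (input1 : List Int) : Int :=
  let n : Int := PySem.List.len input1
  let a0 : List Int := PySem.List.pyRepeat [(0 : Int)] n
  let a1 : List Int := a0.set 0 (PySem.List.pyGetD input1 0 0)   -- the first-element assignment; its IndexError on the empty list is excluded by Pre_
  let a : List Int := (PySem.List.pyRange 1 n 1).foldl
      (fun acc i => acc.set i.toNat (PySem.List.pyGetD input1 i 0 + PySem.List.pyGetD acc (i - 1) 0)) a1
  let longvalue : Int := 1000000007
  let answer : Int := (PySem.List.pyRange 1 (PySem.List.len a + 1) 1).foldl (fun answer i =>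
      (PySem.List.pyRange 0 (PySem.List.len a + 1 - i) 1).foldl (fun answer j =>
        let save : Int :=
          if j = 0 then 0 + PySem.List.pyGetD a (i + j - 1) 0
          else 0 + (PySem.List.pyGetD a (i + j - 1) 0 - PySem.List.pyGetD a (j - 1) 0)
        answer + PySem.Int.mod (PySem.Int.mod save longvalue * PySem.Int.mod (PySem.List.pyGetD input1 (i + j - 1) 0) longvalue) longvalue)
        answer) 0
  PySem.Int.mod answer longvalue

-- ===== PORT B =====
def possibleways_alt (input1 : List Int) : Int :=
  let M : Int := 1000000007
  let s : Int × Int := (PySem.List.enumerate input1 0).foldl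
      (fun (s : Int × Int) p =>
        let t := s.1 + (p.1 + 1) * p.2
        (t, s.2 + t * p.2)) (0, 0)
  PySem.Int.mod s.2 M

-- ===== PRECONDITION & SPEC =====
-- Pre_ excludes only the empty list, on which A raises IndexError at its first-element assignment.
def Pre_possibleways (input1 : List Int) : Prop := input1 ≠ []
instance (input1 : List Int) : Decidable (Pre_possibleways input1) := by unfold Pre_possibleways; infer_instance
def pvWitness_possibleways : List Int := ([3, -1, 2])

def Spec_possibleways (input1 : List Int) (out : Int) : Prop := out = possibleways_alt input1
instance (input1 : List Int) (out : Int) : Decidable (Spec_possibleways input1 out) := by unfold Spec_possibleways; infer_instance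

-- ===== CLAIM (what is proved, stated in full; the proofs are below) =====
def Claim_equal_possibleways : Prop := ∀ (input1 : List Int), Dom_possibleways input1 → Pre_possibleways input1 → Spec_possibleways input1 (possibleways input1)

-- ===== LEMMAS AND PROOFS =====

-- prefix sum of the first k elements
def pvP (xs : List Int) (k : Int) : Int := (xs.take k.toNat).sum

-- contribution of the subarray of length i starting at j: (its sum) * (its last element)
def pvG (xs : List Int) (i j : Int) : Int :=
  (pvP xs (i + j) - pvP xs j) * PySem.List.pyGetD xs (i + j - 1) 0

-- sum of the sums of all subarrays ending strictly before index k
def pvTT (xs : List Int) (k : Int) : Int :=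
  ((PySem.List.pyRange 0 k 1).map (fun s => pvP xs k - pvP xs s)).sum

-- A's double sum, grouped by (length i, start j)
def pvLHS (xs : List Int) (m : Int) : Int :=
  ((PySem.List.pyRange 1 (m + 1) 1).map (fun i =>
    ((PySem.List.pyRange 0 (m + 1 - i) 1).map (fun j => pvG xs i j)).sum)).sum

-- B's sum, grouped by end index e
def pvRHS (xs : List Int) (m : Int) : Int :=
  ((PySem.List.pyRange 0 m 1).map (fun e => PySem.List.pyGetD xs e 0 * pvTT xs (e + 1))).sum

theorem pvP_succ (xs : List Int) (m : Nat) :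
    pvP xs ((m : Int) + 1) = pvP xs (m : Int) + PySem.List.pyGetD xs (m : Int) 0 := by
  simp only [pvP]
  have h1 : ((m : Int) + 1).toNat = m + 1 := by omega
  have h2 : ((m : Int)).toNat = m := by omega
  rw [h1, h2, List.take_add_one, List.sum_append, PySem.List.pyGetD_natCast]
  cases h : xs[m]? with
  | none => simp [List.getD, h]
  | some v => simp [List.getD, h]

theorem pvTT_succ (xs : List Int) (m : Nat) :
    pvTT xs ((m : Int) + 1) = pvTT xs (m : Int) + ((m : Int) + 1) * PySem.List.pyGetD xs (m : Int) 0 := by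
  have hc : (fun s => pvP xs ((m:Int)+1) - pvP xs s) = (fun s => (pvP xs (m:Int) - pvP xs s) + PySem.List.pyGetD xs (m:Int) 0) := by
    funext s; rw [pvP_succ]; ring
  simp only [pvTT, PySem.List.pyRange_one_succ_right (show (0:Int) ≤ (m:Int) by omega),
    List.map_append, List.sum_append, hc, PySem.List.sum_map_add_int,
    PySem.List.sum_map_const_int, PySem.List.length_pyRange_one,
    List.map_cons, List.map_nil, List.sum_cons, List.sum_nil]
  have hh : (((m:Int) - 0).toNat : Int) = (m : Int) := by omega
  rw [hh]; ring

theorem pvRHS_succ (xs : List Int) (m : Nat) :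
    pvRHS xs ((m : Int) + 1) = pvRHS xs (m : Int) + PySem.List.pyGetD xs (m : Int) 0 * pvTT xs ((m : Int) + 1) := by
  simp only [pvRHS, PySem.List.pyRange_one_succ_right (show (0:Int) ≤ (m:Int) by omega),
    List.map_append, List.sum_append, List.map_cons, List.map_nil, List.sum_cons, List.sum_nil]
  ring

-- B's fold computes (pvTT, pvRHS)
theorem pv_b_fold (xs : List Int) (m : Nat) :
    (PySem.List.pyRange 0 (m : Int) 1).foldl
      (fun (s : Int × Int) j =>
        let t := s.1 + (j + 1) * PySem.List.pyGetD xs j 0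
        (t, s.2 + t * PySem.List.pyGetD xs j 0)) (0, 0)
    = (pvTT xs (m : Int), pvRHS xs (m : Int)) := by
  induction m with
  | zero =>
    simp [PySem.List.pyRange_one_eq_nil (by omega : (0:Int) ≤ 0), pvTT, pvRHS]
  | succ k ih =>
    have : ((k + 1 : Nat) : Int) = (k : Int) + 1 := by push_cast; ring
    rw [this, PySem.List.pyRange_one_succ_right (show (0:Int) ≤ (k:Int) by omega),
      List.foldl_append, ih]
    simp only [List.foldl_cons, List.foldl_nil]
    rw [pvTT_succ, pvRHS_succ]
    refine Prod.ext rfl ?_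
    simp only [pvTT_succ]
    ring

theorem pv_b_char (xs : List Int) :
    (PySem.List.enumerate xs 0).foldl
      (fun (s : Int × Int) p =>
        let t := s.1 + (p.1 + 1) * p.2
        (t, s.2 + t * p.2)) (0, 0)
    = (pvTT xs (xs.length : Int), pvRHS xs (xs.length : Int)) := by
  rw [PySem.List.enumerate_eq_map_pyRange (d := 0), List.foldl_map]
  have := pv_b_fold xs xs.length
  simpa [PySem.List.len_eq] using this

-- reversing the inner index: summing f over lengths 1..n equals summing f over starts 0..n-1
theorem pv_sum_reflect (f : Int → Int) (n : Nat) :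
    ((PySem.List.pyRange 1 ((n : Int) + 1) 1).map (fun i => f ((n : Int) - i))).sum
      = ((PySem.List.pyRange 0 (n : Int) 1).map f).sum := by
  rw [PySem.List.pyRange_one 1 ((n : Int) + 1), PySem.List.pyRange_one 0 (n : Int)]
  simp only [List.map_map]
  have h1 : (((n : Int) + 1 - 1).toNat) = n := by omega
  have h2 : (((n : Int) - 0).toNat) = n := by omega
  rw [h1, h2]
  have key : ∑ k ∈ Finset.range n, f ((n : Int) - (1 + (k : Int)))
      = ∑ k ∈ Finset.range n, f ((0 : Int) + (k : Int)) := by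
    rw [← Finset.sum_range_reflect (fun k => f ((0 : Int) + (k : Int))) n]
    apply Finset.sum_congr rfl
    intro k hk
    have hk' : k < n := Finset.mem_range.mp hk
    congr 1
    omega
  exact key

-- the (length, start) double sum re-grouped by end index
theorem pv_reindex (xs : List Int) (m : Nat) : pvLHS xs (m : Int) = pvRHS xs (m : Int) := by
  induction m with
  | zero =>
    simp [pvLHS, pvRHS, pvG, pvP, PySem.List.pyRange_one_eq_nil (le_refl (0 : Int))]
  | succ k ih =>
    have hcast : ((k + 1 : Nat) : Int) = (k : Int) + 1 := by push_cast; ring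
    rw [hcast]
    have houter : PySem.List.pyRange 1 ((k : Int) + 1 + 1) 1
        = PySem.List.pyRange 1 ((k : Int) + 1) 1 ++ [(k : Int) + 1] :=
      PySem.List.pyRange_one_succ_right (by omega)
    have hinner : ∀ i ∈ PySem.List.pyRange 1 ((k : Int) + 1) 1,
        ((PySem.List.pyRange 0 ((k : Int) + 1 + 1 - i) 1).map (fun j => pvG xs i j)).sum
        = ((PySem.List.pyRange 0 ((k : Int) + 1 - i) 1).map (fun j => pvG xs i j)).sum
          + pvG xs i ((k : Int) + 1 - i) := by
      intro i hi
      have hi' := (PySem.List.mem_pyRange_one).mp hi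
      have he : (k : Int) + 1 + 1 - i = ((k : Int) + 1 - i) + 1 := by ring
      rw [he, PySem.List.pyRange_one_succ_right (by omega), List.map_append, List.sum_append]
      simp
    simp only [pvLHS, houter, List.map_append, List.sum_append,
      List.map_cons, List.map_nil, List.sum_cons, List.sum_nil]
    rw [List.map_congr_left hinner, PySem.List.sum_map_add_int]
    have hLk : ((PySem.List.pyRange 1 ((k : Int) + 1) 1).map (fun i =>
        ((PySem.List.pyRange 0 ((k : Int) + 1 - i) 1).map (fun j => pvG xs i j)).sum)).sum
        = pvLHS xs (k : Int) := rfl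
    rw [hLk, ih, pvRHS_succ]
    have hg : ∀ i ∈ PySem.List.pyRange 1 ((k : Int) + 1 + 1) 1,
        pvG xs i ((k : Int) + 1 - i)
          = (pvP xs ((k : Int) + 1) - pvP xs ((k : Int) + 1 - i)) * PySem.List.pyGetD xs (k : Int) 0 := by
      intro i hi
      have h1 : i + ((k : Int) + 1 - i) = (k : Int) + 1 := by ring
      simp only [pvG, h1]
      rw [show (k : Int) + 1 - 1 = (k : Int) from by ring]
    have hsplit : ((PySem.List.pyRange 1 ((k : Int) + 1 + 1) 1).map (fun i => pvG xs i ((k : Int) + 1 - i))).sum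
        = ((PySem.List.pyRange 1 ((k : Int) + 1) 1).map (fun i => pvG xs i ((k : Int) + 1 - i))).sum
          + pvG xs ((k : Int) + 1) ((k : Int) + 1 - ((k : Int) + 1)) := by
      rw [houter, List.map_append, List.sum_append]; simp
    have hrefl : ((PySem.List.pyRange 1 ((k : Int) + 1 + 1) 1).map (fun i => pvG xs i ((k : Int) + 1 - i))).sum
        = PySem.List.pyGetD xs (k : Int) 0 * pvTT xs ((k : Int) + 1) := by
      rw [List.map_congr_left hg]
      have := pv_sum_reflect (fun s => (pvP xs ((k : Int) + 1) - pvP xs s) * PySem.List.pyGetD xs (k : Int) 0) (k + 1)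
      rw [hcast] at this
      have harg : (fun i => (pvP xs ((k:Int)+1) - pvP xs ((k:Int)+1-i)) * PySem.List.pyGetD xs (k:Int) 0)
          = (fun i => (fun s => (pvP xs ((k:Int)+1) - pvP xs s) * PySem.List.pyGetD xs (k:Int) 0) ((k:Int)+1-i)) := rfl
      rw [harg, this]
      simp only [pvTT]
      rw [List.sum_map_mul_right, mul_comm]
    have hzero : (k : Int) + 1 - ((k : Int) + 1) = 0 := by ring
    rw [hzero] at hsplit
    have hfin : ((PySem.List.pyRange 1 ((k : Int) + 1) 1).map (fun i => pvG xs i ((k : Int) + 1 - i))).sum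
        + (pvG xs ((k : Int) + 1) 0 + 0)
        = PySem.List.pyGetD xs (k : Int) 0 * pvTT xs ((k : Int) + 1) := by
      rw [← hrefl, hsplit]; ring
    rw [show (k : Int) + 1 + 1 - ((k : Int) + 1) = (0 : Int) + 1 from by ring,
      PySem.List.pyRange_one_singleton, List.map_cons, List.map_nil, List.sum_cons, List.sum_nil]
    linear_combination hfin

-- summing values that agree modulo M gives the same sum modulo M
theorem pv_sum_mod (M : Int) (l : List Int) (f g : Int → Int)
    (h : ∀ x ∈ l, f x % M = g x % M) :
    ((l.map f).sum) % M = ((l.map g).sum) % M := by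
  induction l with
  | nil => rfl
  | cons a t ih =>
    simp only [List.map_cons, List.sum_cons]
    have h1 := h a (by simp)
    have ih' := ih (fun x hx => h x (by simp [hx]))
    rw [Int.add_emod, h1, ih', ← Int.add_emod]

-- A's prefix array holds the prefix sums
theorem pv_a_build (xs : List Int) (m : Nat) (h1 : 1 ≤ m) (h2 : m ≤ xs.length) :
    (((PySem.List.pyRange 1 (m : Int) 1).foldl
        (fun acc i => acc.set i.toNat (PySem.List.pyGetD xs i 0 + PySem.List.pyGetD acc (i - 1) 0))
        ((PySem.List.pyRepeat [(0 : Int)] (PySem.List.len xs)).set 0 (PySem.List.pyGetD xs 0 0))).length = xs.length)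
    ∧ (∀ k : Nat, k < m →
      ((PySem.List.pyRange 1 (m : Int) 1).foldl
        (fun acc i => acc.set i.toNat (PySem.List.pyGetD xs i 0 + PySem.List.pyGetD acc (i - 1) 0))
        ((PySem.List.pyRepeat [(0 : Int)] (PySem.List.len xs)).set 0 (PySem.List.pyGetD xs 0 0)))[k]?
        = some (pvP xs ((k : Int) + 1))) := by
  induction m with
  | zero => omega
  | succ p ih =>
    by_cases hp : p = 0
    · subst hp
      have hr : PySem.List.pyRange 1 ((1 : Nat) : Int) 1 = [] :=
        PySem.List.pyRange_one_eq_nil (by norm_num)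
      rw [hr]
      simp only [List.foldl_nil]
      have hlen : ((PySem.List.pyRepeat [(0 : Int)] (PySem.List.len xs)).set 0
          (PySem.List.pyGetD xs 0 0)).length = xs.length := by
        rw [List.length_set, PySem.List.pyRepeat_singleton, List.length_replicate,
          PySem.List.len_eq, Int.toNat_natCast]
      refine ⟨hlen, ?_⟩
      intro k hk
      interval_cases k
      have h0 : 0 < xs.length := by omega
      rw [List.getElem?_set_self (by
        rw [PySem.List.pyRepeat_singleton, List.length_replicate, PySem.List.len_eq, Int.toNat_natCast]; omega)]
      congr 1
      simp only [pvP]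
      cases xs with
      | nil => simp at h0
      | cons y t => simp [PySem.List.pyGetD, PySem.List.pyIdx?, PySem.List.pyGet?]
    · have hp1 : 1 ≤ p := by omega
      have hp2 : p ≤ xs.length := by omega
      obtain ⟨ihlen, ihget⟩ := ih hp1 hp2
      have hcast : ((p + 1 : Nat) : Int) = (p : Int) + 1 := by push_cast; ring
      rw [hcast, PySem.List.pyRange_one_succ_right (by omega : (1 : Int) ≤ (p : Int)),
        List.foldl_append, List.foldl_cons, List.foldl_nil]
      set L := (PySem.List.pyRange 1 (p : Int) 1).foldl
        (fun acc i => acc.set i.toNat (PySem.List.pyGetD xs i 0 + PySem.List.pyGetD acc (i - 1) 0))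
        ((PySem.List.pyRepeat [(0 : Int)] (PySem.List.len xs)).set 0 (PySem.List.pyGetD xs 0 0)) with hL
      have hv : PySem.List.pyGetD L ((p : Int) - 1) 0 = pvP xs (p : Int) := by
        have hcast2 : ((p : Int) - 1) = ((p - 1 : Nat) : Int) := by omega
        rw [hcast2, PySem.List.pyGetD_natCast]
        have := ihget (p - 1) (by omega)
        rw [List.getD, this]
        simp only [Option.getD_some]
        congr 1
        omega
      constructor
      · rw [List.length_set]; exact ihlen
      · intro k hk
        by_cases hkp : k = p
        · subst hkp
          rw [show ((k : Int)).toNat = k from by omega, List.getElem?_set_self (by omega)]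
          rw [hv, pvP_succ]
          congr 1
          ring
        · have hklt : k < p := by omega
          rw [show ((p : Int)).toNat = p from by omega, List.getElem?_set_ne (by omega)]
          exact ihget k hklt

-- A evaluates to pvLHS modulo the prime
theorem pvP_zero (xs : List Int) : pvP xs 0 = 0 := rfl

theorem pv_a_eval (xs : List Int) (hpre : xs ≠ []) :
    possibleways xs = PySem.Int.mod (pvLHS xs (xs.length : Int)) 1000000007 := by
  have hn : 1 ≤ xs.length := by
    cases xs with
    | nil => exact absurd rfl hpre
    | cons y t => simp
  obtain ⟨hal, haget⟩ := pv_a_build xs xs.length hn le_rfl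
  simp only [PySem.List.len_eq] at hal haget
  simp only [possibleways, PySem.List.len_eq]
  rw [hal]
  set A := (PySem.List.pyRange 1 ((xs.length : Nat) : Int) 1).foldl
      (fun acc i => acc.set i.toNat (PySem.List.pyGetD xs i 0 + PySem.List.pyGetD acc (i - 1) 0))
      ((PySem.List.pyRepeat [(0 : Int)] ((xs.length : Nat) : Int)).set 0 (PySem.List.pyGetD xs 0 0)) with hA
  have hAget : ∀ t : Int, 0 ≤ t → t < (xs.length : Int) → PySem.List.pyGetD A t 0 = pvP xs (t + 1) := by
    intro t ht1 ht2
    have hk : t = ((t.toNat : Nat) : Int) := by omega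
    rw [hk, PySem.List.pyGetD_natCast, List.getD, haget t.toNat (by omega)]
    simp only [Option.getD_some]
  -- the two accumulating loops are sums
  have hfun : (fun (answer : Int) (i : Int) =>
      (PySem.List.pyRange 0 ((xs.length : Int) + 1 - i) 1).foldl (fun answer j =>
        answer + PySem.Int.mod (PySem.Int.mod
            (if j = 0 then 0 + PySem.List.pyGetD A (i + j - 1) 0
             else 0 + (PySem.List.pyGetD A (i + j - 1) 0 - PySem.List.pyGetD A (j - 1) 0)) 1000000007
          * PySem.Int.mod (PySem.List.pyGetD xs (i + j - 1) 0) 1000000007) 1000000007) answer)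
      = (fun (answer : Int) (i : Int) => answer +
        ((PySem.List.pyRange 0 ((xs.length : Int) + 1 - i) 1).map (fun j =>
          PySem.Int.mod (PySem.Int.mod
            (if j = 0 then 0 + PySem.List.pyGetD A (i + j - 1) 0
             else 0 + (PySem.List.pyGetD A (i + j - 1) 0 - PySem.List.pyGetD A (j - 1) 0)) 1000000007
          * PySem.Int.mod (PySem.List.pyGetD xs (i + j - 1) 0) 1000000007) 1000000007)).sum) := by
    funext answer i
    rw [PySem.List.foldl_add]
  rw [hfun, PySem.List.foldl_add, zero_add]
  rw [PySem.Int.mod_eq_emod_of_pos (by norm_num : (0:Int) < 1000000007),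
    PySem.Int.mod_eq_emod_of_pos (by norm_num : (0:Int) < 1000000007)]
  simp only [pvLHS]
  apply pv_sum_mod
  intro i hi
  have hi' := (PySem.List.mem_pyRange_one).mp hi
  apply pv_sum_mod
  intro j hj
  have hj' := (PySem.List.mem_pyRange_one).mp hj
  simp only [PySem.Int.mod_eq_emod_of_pos (by norm_num : (0:Int) < 1000000007)]
  rw [Int.emod_emod_of_dvd _ dvd_rfl, ← Int.mul_emod]
  have hidx : PySem.List.pyGetD A (i + j - 1) 0 = pvP xs (i + j) := by
    rw [hAget (i + j - 1) (by omega) (by omega)]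
    congr 1
    ring
  congr 1
  by_cases hj0 : j = 0
  · subst hj0
    rw [if_pos rfl, hidx]
    simp only [pvG, pvP_zero]
    ring
  · rw [if_neg hj0, hidx, hAget (j - 1) (by omega) (by omega)]
    simp only [pvG]
    rw [show j - 1 + 1 = j from by ring]
    ring

theorem pv_b_eval (xs : List Int) :
    possibleways_alt xs = PySem.Int.mod (pvRHS xs (xs.length : Int)) 1000000007 := by
  simp only [possibleways_alt, pv_b_char]

-- ===== VERDICT (by name: the statement is the Claim_ definition above) =====
theorem possibleways_spec : Claim_equal_possibleways := by
  intro xs _hd hpre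
  unfold Spec_possibleways
  rw [pv_a_eval xs hpre, pv_b_eval, pv_reindex]
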